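-- pv_equiv track=rewrite | github.com/NeroZero747/Python-Learning | scripts/_fix_remove_hover_mod04.py | strip_css_hover
-- ===== SOURCE A (Python) =====
-- def parse_css_blocks(css):
--     """Split CSS into (kind, selector, body) tuples."""
--     blocks = []
--     i = 0
--     n = len(css)
--     while i < n:
--         brace = css.find("{", i)
--         if brace == -1:
--             blocks.append(("tail", css[i:], ""))
--             break
--         sel = css[i:brace]
--         depth = 1
--         j = brace + 1
--         while j < n and depth > 0:
--             if css[j] == "{":
--                 depth += 1
--             elif css[j] == "}":
--                 depth -= 1
--             j += 1
--         blocks.append(("rule", sel, css[brace + 1 : j - 1]))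
--         i = j
--     return blocks
--
-- def strip_css_hover(css):
--     """Remove :hover rules from CSS, preserving lesson-nav-link:hover."""
--     blocks = parse_css_blocks(css)
--     out = []
--     for kind, sel, body in blocks:
--         if kind == "tail":
--             out.append(sel)
--             continue
--
--         sel_stripped = sel.strip()
--
--         # @-rules: recurse into body
--         if sel_stripped.startswith("@"):
--             inner = strip_css_hover(body)
--             inner_clean = inner.strip()
--             if inner_clean:
--                 out.append(f"{sel}{{{inner}}}")
--             # else: drop empty @-rule
--             continue
--
--         # :hover selectors — keep only lesson-nav-link ones
--         if ":hover" in sel_stripped: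
--             if "lesson-nav-link" in sel_stripped:
--                 out.append(f"{sel}{{{body}}}")
--             # else: drop the rule
--             continue
--
--         # Everything else: keep
--         out.append(f"{sel}{{{body}}}")
--
--     return "".join(out)
-- ===== SOURCE B (Python) =====
-- def strip_css_hover(css):
--     out = []
--     sel_chars = []
--     i, n = 0, len(css)
--     while i < n:
--         c = css[i]
--         if c != "{":
--             sel_chars.append(c)
--             i += 1
--             continue
--         depth, j = 1, i + 1
--         while j < n and depth:
--             if css[j] == "{":
--                 depth += 1
--             elif css[j] == "}":
--                 depth -= 1
--             j += 1
--         sel = "".join(sel_chars)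
--         body = css[i + 1 : j - 1]
--         s = sel.strip()
--         if s.startswith("@"):
--             inner = strip_css_hover(body)
--             if inner.strip():
--                 out.append(sel + "{" + inner + "}")
--         elif ":hover" in s:
--             if "lesson-nav-link" in s:
--                 out.append(sel + "{" + body + "}")
--         else:
--             out.append(sel + "{" + body + "}")
--         sel_chars = []
--         i = j
--     out.append("".join(sel_chars))
--     return "".join(out)
-- ===== Notes on version B (the rewrite author's own statement) =====
-- stated objective: alternative
-- what changed: B replaces A's two-phase design (parse the whole stylesheet into a (kind, selector, body) block list, then filter it in a second loop) with a single streaming scan that accumulates selector characters and emits or drops each rule the moment its closing brace is found, recursing into @-rule bodies directly.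
import Mathlib
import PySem

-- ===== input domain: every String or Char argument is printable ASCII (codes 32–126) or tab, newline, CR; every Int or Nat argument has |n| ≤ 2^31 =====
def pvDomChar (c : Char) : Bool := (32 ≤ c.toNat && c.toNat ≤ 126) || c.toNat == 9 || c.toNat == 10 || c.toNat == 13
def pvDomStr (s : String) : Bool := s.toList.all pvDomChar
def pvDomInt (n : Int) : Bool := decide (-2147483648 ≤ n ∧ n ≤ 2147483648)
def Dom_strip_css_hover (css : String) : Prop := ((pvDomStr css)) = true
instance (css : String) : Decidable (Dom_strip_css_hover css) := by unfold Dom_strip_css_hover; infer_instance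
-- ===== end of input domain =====

-- B re-implements strip_css_hover as a single streaming scan that emits each rule as it is
-- closed (no intermediate block list); same return value as A on every input (objective: alternative).
-- Both ports carry a fuel argument (css.length + 1) solely to make the recursion into
-- @-rule bodies structurally total; it is never exhausted (each body is strictly shorter).

-- ===== PORT A =====
-- inner `while j < n and depth > 0` brace-matching loop (textually identical in A and B):
-- returns the final j
def pvScan (cs : List Char) (j depth : Nat) : Nat :=
  if h : j < cs.length ∧ 0 < depth then
    let c := cs[j]'h.1
    pvScan cs (j + 1) (if c = '{' then depth + 1 else if c = '}' then depth - 1 else depth)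
  else j
termination_by cs.length - j
decreasing_by exact Nat.sub_succ_lt_self _ _ h.1

-- lower bound on pvScan, needed by the termination proofs of both outer loops
theorem pvScan_ge (cs : List Char) (j depth : Nat) : j ≤ pvScan cs j depth := by
  have aux : ∀ (k j depth : Nat), cs.length - j ≤ k → j ≤ pvScan cs j depth := by
    intro k
    induction k with
    | zero =>
      intro j depth hk
      rw [pvScan, dif_neg (fun hc => (Nat.not_lt.mpr (Nat.le_of_sub_eq_zero (Nat.le_zero.mp hk))) hc.1)]
    | succ k ih =>
      intro j depth hk
      rw [pvScan]
      split
      · exact Nat.le_trans (Nat.le_succ j)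
          (ih (j + 1) _ (Nat.le_trans (Nat.le_of_eq (Nat.sub_succ _ _)) (Nat.pred_le_pred hk)))
      · exact Nat.le_refl j
  exact aux cs.length j depth (Nat.sub_le _ _)

-- the termination argument of parse_css_blocks's loop, factored out
theorem parse_dec (cs : List Char) (i : Nat) (h : i < cs.length)
    (hb : ¬ PySem.Chars.findFrom cs ['{'] (i : Int) = -1) :
    cs.length - pvScan cs ((PySem.Chars.findFrom cs ['{'] (i : Int)).toNat + 1) 1 <
      cs.length - i := by
  have hge := (PySem.Chars.findFrom_natCast_spec cs ['{'] i (Nat.le_of_lt h) hb).1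
  have hi : i ≤ (PySem.Chars.findFrom cs ['{'] (i : Int)).toNat :=
    (Int.le_toNat (le_trans (Int.natCast_nonneg i) hge)).mpr hge
  exact Nat.sub_lt_sub_left h
    (Nat.lt_of_lt_of_le (Nat.lt_succ_of_le hi)
      (pvScan_ge cs ((PySem.Chars.findFrom cs ['{'] (i : Int)).toNat + 1) 1))

-- the `while i < n` loop of parse_css_blocks (i is the loop variable)
def parse_css_blocks (cs : List Char) (i : Nat) : List (String × List Char × List Char) :=
  if h : i < cs.length then
    let brace := PySem.Chars.findFrom cs ['{'] (i : Int)
    if hb : brace = -1 then [("tail", PySem.List.slice cs (some (i : Int)) none, [])]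
    else
      let sel := PySem.List.slice cs (some (i : Int)) (some brace)
      let j := pvScan cs (brace.toNat + 1) 1
      ("rule", sel, PySem.List.slice cs (some (brace + 1)) (some ((j : Int) - 1))) ::
        parse_css_blocks cs j
  else []
termination_by cs.length - i
decreasing_by exact parse_dec cs i h hb

-- strip_css_hover on char lists; fuel bounds the @-rule nesting depth and is never
-- exhausted when started at cs.length + 1
def pvStripAF : Nat → List Char → List Char
  | 0, _ => []
  | fuel + 1, cs =>
    PySem.Chars.join []
      ((parse_css_blocks cs 0).foldl
        (fun out blk =>
          if blk.1 = "tail" then out ++ [blk.2.1]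
          else
            let sel_stripped := PySem.Chars.strip blk.2.1
            if PySem.Chars.startswith sel_stripped ("@".toList) then
              let inner := pvStripAF fuel blk.2.2
              let inner_clean := PySem.Chars.strip inner
              if inner_clean ≠ [] then out ++ [blk.2.1 ++ '{' :: (inner ++ ['}'])] else out
            else if PySem.Chars.isIn (":hover".toList) sel_stripped then
              if PySem.Chars.isIn ("lesson-nav-link".toList) sel_stripped then
                out ++ [blk.2.1 ++ '{' :: (blk.2.2 ++ ['}'])]
              else out
            else out ++ [blk.2.1 ++ '{' :: (blk.2.2 ++ ['}'])])
        [])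

def pvStripA (cs : List Char) : List Char := pvStripAF (cs.length + 1) cs

def strip_css_hover (css : String) : String :=
  String.ofList (pvStripA css.toList)

-- ===== PORT B =====
-- B: one streaming pass; sel accumulates the chars of the pending selector and each
-- closed rule is emitted (or dropped) immediately; fuel as in port A
def pvGoBF (fuel : Nat) (cs : List Char) (i : Nat) (sel : List Char)
    (out : List (List Char)) : List (List Char) :=
  if h : i < cs.length then
    if _hc : cs[i]'h ≠ '{' then pvGoBF fuel cs (i + 1) (sel ++ [cs[i]'h]) out
    else
      let j := pvScan cs (i + 1) 1
      let body := PySem.List.slice cs (some ((i : Int) + 1)) (some ((j : Int) - 1))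
      let s := PySem.Chars.strip sel
      let piece :=
        if PySem.Chars.startswith s ("@".toList) then
          match fuel with
          | 0 => []
          | fuel' + 1 =>
            let inner := PySem.Chars.join [] (pvGoBF fuel' body 0 [] [])
            if PySem.Chars.strip inner ≠ [] then [sel ++ '{' :: (inner ++ ['}'])] else []
        else if PySem.Chars.isIn (":hover".toList) s then
          if PySem.Chars.isIn ("lesson-nav-link".toList) s then [sel ++ '{' :: (body ++ ['}'])]
          else []
        else [sel ++ '{' :: (body ++ ['}'])]
      pvGoBF fuel cs j [] (out ++ piece)
  else out ++ [sel]
termination_by (fuel, cs.length - i)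
decreasing_by
  · exact Prod.Lex.right _ (Nat.sub_succ_lt_self _ _ h)
  · exact Prod.Lex.left _ _ (Nat.lt_succ_self _)
  · exact Prod.Lex.right _
      (Nat.sub_lt_sub_left h (Nat.lt_of_lt_of_le (Nat.lt_succ_self i) (pvScan_ge cs (i + 1) 1)))

def pvStripB (cs : List Char) : List Char :=
  PySem.Chars.join [] (pvGoBF (cs.length + 1) cs 0 [] [])

def strip_css_hover_alt (css : String) : String :=
  String.ofList (pvStripB css.toList)

-- ===== PRECONDITION & SPEC =====
def Spec_strip_css_hover (css : String) (out : String) : Prop := out = strip_css_hover_alt css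
instance (css : String) (out : String) : Decidable (Spec_strip_css_hover css out) := by unfold Spec_strip_css_hover; infer_instance

-- ===== CLAIM (what is proved, stated in full; the proofs are below) =====
def Claim_equal_strip_css_hover : Prop := ∀ (css : String), Dom_strip_css_hover css → Spec_strip_css_hover css (strip_css_hover css)

-- ===== LEMMAS AND PROOFS =====

-- pvScan never runs past the end of the string
theorem pvScan_le (cs : List Char) (j depth : Nat) (hj : j ≤ cs.length) :
    pvScan cs j depth ≤ cs.length := by
  have aux : ∀ (k j depth : Nat), cs.length - j ≤ k → j ≤ cs.length →
      pvScan cs j depth ≤ cs.length := by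
    intro k
    induction k with
    | zero =>
      intro j depth hk hj
      rw [pvScan, dif_neg (fun hc => (Nat.not_lt.mpr (Nat.le_of_sub_eq_zero (Nat.le_zero.mp hk))) hc.1)]
      exact hj
    | succ k ih =>
      intro j depth hk hj
      rw [pvScan]
      split
      · next h =>
        exact ih (j + 1) _ (Nat.le_trans (Nat.le_of_eq (Nat.sub_succ _ _)) (Nat.pred_le_pred hk)) h.1
      · exact hj
  exact aux cs.length j depth (Nat.sub_le _ _) hj

theorem pv_join_nil_flatten (l : List (List Char)) : PySem.Chars.join [] l = l.flatten := by
  show List.intercalate [] l = l.flatten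
  induction l with
  | nil => rfl
  | cons a t ih =>
    cases t with
    | nil => rfl
    | cons b t2 =>
      show a ++ ([] ++ List.intercalate [] (b :: t2)) = _
      rw [ih]; simp

-- what one iteration of A's for-loop appends for one block (at nesting fuel f)
def pvEmitAF (f : Nat) (blk : String × List Char × List Char) : List (List Char) :=
  if blk.1 = "tail" then [blk.2.1]
  else
    let s := PySem.Chars.strip blk.2.1
    if PySem.Chars.startswith s ("@".toList) then
      let inner := pvStripAF f blk.2.2
      if PySem.Chars.strip inner ≠ [] then [blk.2.1 ++ '{' :: (inner ++ ['}'])] else []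
    else if PySem.Chars.isIn (":hover".toList) s then
      if PySem.Chars.isIn ("lesson-nav-link".toList) s then [blk.2.1 ++ '{' :: (blk.2.2 ++ ['}'])]
      else []
    else [blk.2.1 ++ '{' :: (blk.2.2 ++ ['}'])]

theorem pvStripAF_char (f : Nat) (cs : List Char) :
    pvStripAF (f + 1) cs = PySem.Chars.join [] ((parse_css_blocks cs 0).flatMap (pvEmitAF f)) := by
  show PySem.Chars.join [] ((parse_css_blocks cs 0).foldl _ []) = _
  rw [show (fun (out : List (List Char)) (blk : String × List Char × List Char) =>
        if blk.1 = "tail" then out ++ [blk.2.1]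
        else
          let sel_stripped := PySem.Chars.strip blk.2.1
          if PySem.Chars.startswith sel_stripped ("@".toList) then
            let inner := pvStripAF f blk.2.2
            let inner_clean := PySem.Chars.strip inner
            if inner_clean ≠ [] then out ++ [blk.2.1 ++ '{' :: (inner ++ ['}'])] else out
          else if PySem.Chars.isIn (":hover".toList) sel_stripped then
            if PySem.Chars.isIn ("lesson-nav-link".toList) sel_stripped then
              out ++ [blk.2.1 ++ '{' :: (blk.2.2 ++ ['}'])]
            else out
          else out ++ [blk.2.1 ++ '{' :: (blk.2.2 ++ ['}'])]) =
      (fun out blk => out ++ pvEmitAF f blk) from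
    funext fun out => funext fun blk => by
      simp only [pvEmitAF]
      split_ifs <;> simp]
  rw [PySem.List.foldl_append_eq_flatMap]
  simp

theorem pvGoBF_out (fuel : Nat) (cs : List Char) (i : Nat) (sel : List Char)
    (out : List (List Char)) :
    pvGoBF fuel cs i sel out = out ++ pvGoBF fuel cs i sel [] := by
  rw [pvGoBF]
  conv_rhs => rw [pvGoBF]
  split
  · next h =>
    split
    · next hc => exact pvGoBF_out fuel cs (i + 1) (sel ++ [cs[i]'h]) out
    · next hc =>
      dsimp only
      rw [pvGoBF_out fuel cs (pvScan cs (i + 1) 1) [] (out ++ _),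
        pvGoBF_out fuel cs (pvScan cs (i + 1) 1) [] ([] ++ _)]
      simp
  · simp
termination_by (fuel, cs.length + 1 - i, 1)
decreasing_by
  all_goals (have := pvScan_ge cs (i + 1) 1; apply Prod.Lex.right; apply Prod.Lex.left; omega)

theorem pvGoBF_walk (fuel : Nat) (cs : List Char) (k : Nat) :
    ∀ i sel out, i + k ≤ cs.length →
      (∀ m (hm : m < cs.length), i ≤ m → m < i + k → cs[m]'hm ≠ '{') →
      pvGoBF fuel cs i sel out = pvGoBF fuel cs (i + k) (sel ++ (cs.drop i).take k) out := by
  induction k with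
  | zero => intro i sel out _ _; simp
  | succ k ih =>
    intro i sel out hik hnb
    have hi : i < cs.length := by omega
    rw [pvGoBF]
    rw [dif_pos hi, dif_pos (hnb i hi (le_refl i) (by omega))]
    rw [ih (i + 1) (sel ++ [cs[i]'hi]) out (by omega)
      (fun m hm h1 h2 => hnb m hm (by omega) (by omega))]
    have hdrop : cs.drop i = cs[i]'hi :: cs.drop (i + 1) := List.drop_eq_getElem_cons hi
    rw [show i + 1 + k = i + (k + 1) by omega, hdrop, List.take_succ_cons]
    simp only [List.append_assoc, List.singleton_append]

theorem pvAB_main (f : Nat) (cs : List Char) (i : Nat) (hf : cs.length ≤ f) (hi : i ≤ cs.length) :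
    ((parse_css_blocks cs i).flatMap (pvEmitAF f)).flatten =
      (pvGoBF (f + 1) cs i [] []).flatten := by
  by_cases hin : i < cs.length
  · -- i < n : look for the next '{'
    by_cases hb : PySem.Chars.findFrom cs ['{'] (i : Int) = -1
    · -- no '{' left : A emits one tail block, B walks to the end
      have hno : ∀ m (hm : m < cs.length), i ≤ m → m < i + (cs.length - i) → cs[m]'hm ≠ '{' := by
        intro m hm h1 _ hcm
        have hmem : '{' ∈ cs.drop i := by
          have : cs[m]'hm ∈ cs.drop i := by
            rw [List.mem_drop_iff_getElem]
            exact ⟨m - i, by omega, by congr 1; omega⟩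
          rwa [hcm] at this
        exact ((PySem.Chars.findFrom_natCast_eq_neg_one_iff cs ['{'] i hi).mp hb)
          ((List.singleton_infix_iff _ _).mpr hmem)
      have hwalk := pvGoBF_walk (f + 1) cs (cs.length - i) i [] [] (by omega) hno
      rw [parse_css_blocks, dif_pos hin]
      dsimp only
      rw [dif_pos hb, hwalk, pvGoBF, dif_neg (by omega)]
      rw [PySem.List.slice_from_natCast]
      simp [List.take_of_length_le, pvEmitAF]
    · -- a '{' at position b = findFrom.toNat
      obtain ⟨hge, hpre, hmin⟩ :=
        PySem.Chars.findFrom_natCast_spec cs ['{'] i hi hb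
      set fb := PySem.Chars.findFrom cs ['{'] (i : Int) with hfdef
      set b := fb.toNat with hbdef
      have hfb : fb = (b : Int) := by omega
      have hbn : b < cs.length := by
        rcases hpre with ⟨t, ht⟩
        have h1 : (cs.drop b).length = cs.length - b := List.length_drop
        rw [← ht] at h1
        simp only [List.length_append, List.length_cons, List.length_nil] at h1
        omega
      have hcb : cs[b]'hbn = '{' := by
        rcases hpre with ⟨t, ht⟩
        have h0 : (cs.drop b)[0]? = some '{' := by rw [← ht]; rfl
        rw [List.getElem?_drop] at h0
        rw [List.getElem?_eq_getElem (by omega : b + 0 < cs.length)] at h0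
        simpa using h0
      set j := pvScan cs (b + 1) 1 with hj
      have hjge : b + 1 ≤ j := pvScan_ge cs (b + 1) 1
      have hjle : j ≤ cs.length := pvScan_le cs (b + 1) 1 (by omega)
      -- selector slice
      have hselA : PySem.List.slice cs (some (i : Int)) (some ((b : Nat) : Int)) =
          (cs.drop i).take (b - i) := PySem.List.slice_natCast cs i b
      -- A unfolds to the rule block followed by the parse of the rest
      have hA : parse_css_blocks cs i =
          ("rule", PySem.List.slice cs (some (i : Int)) (some ((b : Nat) : Int)),
            PySem.List.slice cs (some ((b : Int) + 1)) (some ((j : Int) - 1))) ::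
            parse_css_blocks cs j := by
        rw [parse_css_blocks, dif_pos hin]
        dsimp only
        rw [dif_neg hb, ← hfdef, ← hbdef, ← hj, hfb]
      -- B walks to b, then consumes the rule
      have hno : ∀ m (hm : m < cs.length), i ≤ m → m < i + (b - i) → cs[m]'hm ≠ '{' := by
        intro m hm h1 h2 hcm
        refine hmin m h1 (by omega) ⟨cs.drop (m + 1), ?_⟩
        rw [List.singleton_append, ← hcm]
        exact (List.drop_eq_getElem_cons hm).symm
      have hwalk := pvGoBF_walk (f + 1) cs (b - i) i [] [] (by omega) hno
      rw [show i + (b - i) = b by omega] at hwalk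
      -- the body is shorter than cs, so f ≥ 1 and the outer induction applies to it
      have hblen : (PySem.List.slice cs (some ((b : Int) + 1))
          (some ((j : Int) - 1))).length < cs.length := by
        have hlen := PySem.List.length_slice cs ((b : Int) + 1) ((j : Int) - 1)
        have h2 := PySem.List.clampIdx_le cs.length ((j : Int) - 1)
        have h3 : PySem.List.clampIdx cs.length ((b : Int) + 1) = min (b + 1) cs.length := by
          rw [show ((b : Int) + 1) = ((b + 1 : Nat) : Int) by omega, PySem.List.clampIdx_natCast]
        omega
      have hstep : pvGoBF (f + 1) cs b ([] ++ (cs.drop i).take (b - i)) [] =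
          pvGoBF (f + 1) cs j []
            ([] ++ pvEmitAF f ("rule", [] ++ (cs.drop i).take (b - i),
              PySem.List.slice cs (some ((b : Int) + 1)) (some ((j : Int) - 1)))) := by
        rw [pvGoBF, dif_pos hbn, dif_neg (by simp [hcb])]
        dsimp only [pvEmitAF]
        rw [if_neg (by decide : ¬ (("rule" : String) = "tail"))]
        have hinner : PySem.Chars.join [] (pvGoBF f
              (PySem.List.slice cs (some ((b : Int) + 1)) (some ((j : Int) - 1))) 0 [] []) =
            pvStripAF f
              (PySem.List.slice cs (some ((b : Int) + 1)) (some ((j : Int) - 1))) := by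
          rw [show f = (f - 1) + 1 by omega]
          rw [pvStripAF_char, pv_join_nil_flatten, pv_join_nil_flatten]
          exact (pvAB_main (f - 1)
            (PySem.List.slice cs (some ((b : Int) + 1)) (some ((j : Int) - 1))) 0
            (by omega) (Nat.zero_le _)).symm
        rw [hinner]
      rw [hA, hwalk, hstep, pvGoBF_out, List.flatMap_cons]
      simp only [List.flatten_append, List.nil_append, hselA]
      rw [pvAB_main f cs j hf hjle]
  · -- i = n : A parses nothing, B flushes the empty selector
    rw [parse_css_blocks, dif_neg hin, pvGoBF, dif_neg hin]
    simp
termination_by (f, cs.length - i)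
decreasing_by
  all_goals first
    | (apply Prod.Lex.left; omega)
    | (apply Prod.Lex.right
       have hx := pvScan_ge cs ((PySem.Chars.findFrom cs ['{'] (i : Int)).toNat + 1) 1
       omega)

theorem pvAB (cs : List Char) : pvStripA cs = pvStripB cs := by
  rw [pvStripA, pvStripB]
  show pvStripAF (cs.length + 1) cs = _
  rw [pvStripAF_char, pv_join_nil_flatten, pv_join_nil_flatten]
  exact pvAB_main cs.length cs 0 (le_refl _) (Nat.zero_le _)

-- ===== VERDICT (by name: the statement is the Claim_ definition above) =====
theorem strip_css_hover_spec : Claim_equal_strip_css_hover := by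
  intro css _
  unfold Spec_strip_css_hover strip_css_hover strip_css_hover_alt
  exact congrArg String.ofList (pvAB css.toList)
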